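-- pv_equiv track=rewrite | github.com/LionelElisabeth/SudokuIA | HellWor.py | SepareSudoku
-- ===== SOURCE A (Python) =====
-- def SepareSudoku(sudoku, tailleBlocs):
--     listBlocs= []
--     listLignes=[]
--     listColonnes=[]
--     for ligne in sudoku:
--         listLignes.append(ligne)
--     for numColonne in  range(0,len(sudoku[0])):
--         colonne = []
--         for numLigne in range(0,len(sudoku)):
--             colonne.append(sudoku[numLigne][numColonne])
--         listColonnes.append(colonne)
--
--     nbBlockParLigne = len(sudoku)/tailleBlocs
--
--     for i in range (0,int(nbBlockParLigne)):
--         for j in range (0,int(nbBlockParLigne)):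
--             bloc = []
--             for x in range (0,tailleBlocs):
--                 for y in range (0,tailleBlocs):
--                     bloc.append(sudoku[i*tailleBlocs+x][j*tailleBlocs+y])
--             listBlocs.append(bloc)
--
--     return listBlocs,listColonnes,listLignes
-- ===== SOURCE B (Python) =====
-- def SepareSudoku(sudoku, tailleBlocs):
--     t = tailleBlocs
--     rows = list(sudoku)
--     w = len(sudoku[0])
--     nbB = int(len(sudoku) / t)
--     cols = [[] for _ in range(w)]
--     blocks = [[] for _ in range(nbB * nbB)]
--     for i, row in enumerate(rows):
--         for j in range(w):
--             cols[j].append(row[j])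
--         if i < nbB * t:
--             base = (i // t) * nbB
--             for bj in range(nbB):
--                 for y in range(t):
--                     blocks[base + bj].append(row[bj * t + y])
--     return blocks, cols, rows
-- ===== Notes on version B (the rewrite author's own statement) =====
-- stated objective: alternative
-- what changed: A gathers: one pass per column (scanning all rows) and one pass per block (nested block/cell index loops); B makes a single row-major pass over the grid, scattering each row's entries into pre-allocated column buckets and block buckets addressed by (i//t)*nbB + j//t.
-- outside the precondition, e.g. on SepareSudoku([[1]], -1): A returns ([], [[1]], [[1]]), B returns ([[]], [[1]], [[1]])
import Mathlib
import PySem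

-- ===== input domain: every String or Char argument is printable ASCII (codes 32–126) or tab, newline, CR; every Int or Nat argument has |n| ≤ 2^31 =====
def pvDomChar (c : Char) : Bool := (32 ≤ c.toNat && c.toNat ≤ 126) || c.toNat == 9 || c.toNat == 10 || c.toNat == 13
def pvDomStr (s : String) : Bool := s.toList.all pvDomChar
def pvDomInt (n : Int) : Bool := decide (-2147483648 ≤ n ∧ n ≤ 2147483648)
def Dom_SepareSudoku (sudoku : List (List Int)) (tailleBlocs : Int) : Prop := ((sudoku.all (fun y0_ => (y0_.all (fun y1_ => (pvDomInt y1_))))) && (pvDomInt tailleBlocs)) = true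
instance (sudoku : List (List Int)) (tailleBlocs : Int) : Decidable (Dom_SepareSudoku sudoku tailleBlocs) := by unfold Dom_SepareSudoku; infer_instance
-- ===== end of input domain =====

-- B replaces A's per-column and per-block gathering passes by a single row-major scatter pass
-- into pre-allocated column and block buckets (alternative decomposition, same asymptotic cost).
-- Equivalence of RETURN VALUES is proved on Pre_ (tailleBlocs ≥ 1, rows long enough for A's accesses).


-- ===== PORT A =====
-- Literal port of A. Indexing uses PySem.List.pyGetD (IndexError excluded by Pre_).
-- 'int(len(sudoku)/tailleBlocs)' (float true division then int()) is PySem.Int.truncdiv,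
-- exact for |operands| ≤ 2^31 < 2^53 (Dom bound).
def SepareSudoku (sudoku : List (List Int)) (tailleBlocs : Int) :
    List (List Int) × List (List Int) × List (List Int) :=
  let listBlocs : List (List Int) := []
  let listLignes : List (List Int) := sudoku.foldl (fun acc ligne => acc ++ [ligne]) []
  let listColonnes : List (List Int) :=
    (PySem.List.pyRange 0 ((PySem.List.pyGetD sudoku 0 []).length : Int)).foldl
      (fun acc numColonne =>
        let colonne : List Int :=
          (PySem.List.pyRange 0 (sudoku.length : Int)).foldl
            (fun col numLigne =>
              col ++ [PySem.List.pyGetD (PySem.List.pyGetD sudoku numLigne []) numColonne 0]) []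
        acc ++ [colonne]) []
  let nbBlockParLigne : Int := PySem.Int.truncdiv (sudoku.length : Int) tailleBlocs
  let listBlocs : List (List Int) :=
    (PySem.List.pyRange 0 nbBlockParLigne).foldl
      (fun acc i =>
        (PySem.List.pyRange 0 nbBlockParLigne).foldl
          (fun acc j =>
            let bloc : List Int :=
              (PySem.List.pyRange 0 tailleBlocs).foldl
                (fun bloc x =>
                  (PySem.List.pyRange 0 tailleBlocs).foldl
                    (fun bloc y =>
                      bloc ++ [PySem.List.pyGetD
                        (PySem.List.pyGetD sudoku (i * tailleBlocs + x) [])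
                        (j * tailleBlocs + y) 0]) bloc) []
            acc ++ [bloc]) acc) listBlocs
  (listBlocs, listColonnes, listLignes)

-- ===== PORT B =====
-- Literal port of Source B: one pass over enumerate(rows); cols[j].append / blocks[k].append are
-- List.modify at the index (nonnegative under Pre_, so .toNat is exact); 'range(w)' with w : Nat
-- is List.range w; '//' is PySem.Int.floordiv.
def SepareSudoku_alt (sudoku : List (List Int)) (tailleBlocs : Int) :
    List (List Int) × List (List Int) × List (List Int) :=
  let t : Int := tailleBlocs
  let rows : List (List Int) := sudoku
  let w : Nat := (PySem.List.pyGetD sudoku 0 []).length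
  let nbB : Int := PySem.Int.truncdiv (sudoku.length : Int) t
  let cols0 : List (List Int) := List.replicate w []
  let blocks0 : List (List Int) := List.replicate (nbB * nbB).toNat []
  let st :=
    (PySem.List.enumerate rows).foldl
      (fun (st : List (List Int) × List (List Int)) p =>
        ((List.range w).foldl (fun cs j => cs.modify j (fun c => c ++ [p.2.getD j 0])) st.1,
         if p.1 < nbB * t then
           let base : Int := PySem.Int.floordiv p.1 t * nbB
           (PySem.List.pyRange 0 nbB).foldl
             (fun bs bj =>
               (PySem.List.pyRange 0 t).foldl
                 (fun bs y =>
                   bs.modify (base + bj).toNat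
                     (fun b => b ++ [PySem.List.pyGetD p.2 (bj * t + y) 0])) bs) st.2
         else st.2))
      (cols0, blocks0)
  (st.2, st.1, rows)

-- ===== PRECONDITION & SPEC =====
-- Pre_ = exactly the inputs where the Python A returns normally with a meaningful block grid:
-- nonempty grid (else sudoku[0] is IndexError), tailleBlocs ≥ 1 (0 is ZeroDivisionError; a
-- negative tailleBlocs makes A return an empty block list via a negative range bound, a
-- degenerate artefact B does not mimic), every row at least as long as the first (else the
-- column pass raises IndexError), and every row inside the block area long enough for the
-- block pass (else it raises IndexError).
def Pre_SepareSudoku (sudoku : List (List Int)) (tailleBlocs : Int) : Prop :=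
  let span : Nat := (PySem.Int.truncdiv (sudoku.length : Int) tailleBlocs * tailleBlocs).toNat
  sudoku ≠ [] ∧ 1 ≤ tailleBlocs ∧
  (∀ row ∈ sudoku, (sudoku.getD 0 []).length ≤ row.length) ∧
  (∀ i < span, span ≤ (sudoku.getD i []).length)
instance (sudoku : List (List Int)) (tailleBlocs : Int) : Decidable (Pre_SepareSudoku sudoku tailleBlocs) := by unfold Pre_SepareSudoku; infer_instance

def pvWitness_SepareSudoku : List (List Int) × Int := ([[1, 2], [3, 4]], 2)

def Spec_SepareSudoku (sudoku : List (List Int)) (tailleBlocs : Int) (out : List (List Int) × List (List Int) × List (List Int)) : Prop := out = SepareSudoku_alt sudoku tailleBlocs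
instance (sudoku : List (List Int)) (tailleBlocs : Int) (out : List (List Int) × List (List Int) × List (List Int)) : Decidable (Spec_SepareSudoku sudoku tailleBlocs out) := by unfold Spec_SepareSudoku; infer_instance

-- ===== CLAIM (what is proved, stated in full; the proofs are below) =====
def Claim_equal_SepareSudoku : Prop := ∀ (sudoku : List (List Int)) (tailleBlocs : Int), Dom_SepareSudoku sudoku tailleBlocs → Pre_SepareSudoku sudoku tailleBlocs → Spec_SepareSudoku sudoku tailleBlocs (SepareSudoku sudoku tailleBlocs)

-- ===== LEMMAS AND PROOFS =====

-- Closed forms both ports are reduced to (proof helpers only).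
def gridGet (s : List (List Int)) (i j : Nat) : Int := (s.getD i []).getD j 0
def colsCF (s : List (List Int)) (w : Nat) : List (List Int) :=
  (List.range w).map (fun j => (List.range s.length).map (fun i => gridGet s i j))
def blocCF (s : List (List Int)) (tn q r : Nat) : List Int :=
  (List.range tn).flatMap (fun x => (List.range tn).map (fun y => gridGet s (q * tn + x) (r * tn + y)))

theorem trunc_nat (n tn : Nat) : PySem.Int.truncdiv (n:Int) (tn:Int) = ((n/tn : Nat) : Int) := by
  unfold PySem.Int.truncdiv; rw [Int.tdiv_eq_ediv]; simp

-- Port A reduces to the closed forms (per-column / per-block gathering).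
theorem A_cf (s : List (List Int)) (t : Int) (ht : 1 ≤ t) :
    SepareSudoku s t =
      ((List.range (s.length / t.toNat)).flatMap
         (fun q => (List.range (s.length / t.toNat)).map (fun r => blocCF s t.toNat q r)),
       colsCF s (s.getD 0 []).length, s) := by
  obtain ⟨tn, rfl⟩ : ∃ tn : Nat, t = (tn : Int) := ⟨t.toNat, by omega⟩
  unfold SepareSudoku
  simp only [trunc_nat, PySem.List.pyRange_zero_natCast, List.foldl_map,
    PySem.List.foldl_append_singleton_eq_map,
    PySem.List.foldl_append_eq_flatMap, PySem.List.pyGetD_natCast, PySem.List.pyGetD_zero,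
    ← Nat.cast_mul, ← Nat.cast_add, List.nil_append, Int.toNat_natCast]
  unfold colsCF blocCF gridGet
  simp

-- sequential modify at the same index composes
theorem modify_comp {α : Type} (bs : List α) (k : Nat) (f g : α → α) :
    (bs.modify k f).modify k g = bs.modify k (fun x => g (f x)) := by
  apply List.ext_getElem
  · simp
  · intro i h1 h2
    simp only [List.getElem_modify]
    split_ifs <;> rfl

-- a loop appending single elements to bucket k is one append of the mapped list
theorem foldl_modify_append {α β : Type} (l : List β) (f : β → α) (k : Nat) :
    ∀ (bs : List (List α)),
      l.foldl (fun bs y => bs.modify k (fun b => b ++ [f y])) bs =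
        bs.modify k (fun b => b ++ l.map f) := by
  induction l with
  | nil => intro bs; apply List.ext_getElem
           · simp
           · intro i h1 h2; simp only [List.getElem_modify]; split_ifs <;> simp
  | cons y l ih =>
    intro bs
    simp only [List.foldl_cons, ih, modify_comp]
    congr 1; funext b; simp

-- a loop of modifies at consecutive indices off, off+1, … is a mapIdx
theorem foldl_modify_range {α : Type} (f : Nat → α → α) :
    ∀ (m : Nat) (off : Nat) (C : List α),
      (List.range m).foldl (fun cs j => cs.modify (off + j) (f j)) C =
        C.mapIdx (fun k c => if off ≤ k ∧ k < off + m then f (k - off) c else c) := by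
  intro m
  induction m with
  | zero =>
    intro off C
    apply List.ext_getElem
    · simp
    · intro i h1 h2
      simp only [List.getElem_mapIdx, List.range_zero, List.foldl_nil]
      split_ifs with h <;> first | rfl | omega
  | succ m ih =>
    intro off C
    rw [List.range_succ, List.foldl_append, ih]
    simp only [List.foldl_cons, List.foldl_nil]
    apply List.ext_getElem
    · simp
    · intro i h1 h2
      simp only [List.length_modify, List.length_mapIdx] at h1 h2
      simp only [List.getElem_modify, List.getElem_mapIdx]
      by_cases hi : off + m = i
      · rw [if_pos hi, if_neg (by omega), if_pos (by omega)]
        congr 1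
        omega
      · rw [if_neg hi]
        split_ifs with h1' h2' h2' <;> first | rfl | omega

-- columns: one pass of per-row appends equals the per-column closed form
theorem cols_outer {β : Type} (w : Nat) (v : β → Nat → Int) :
    ∀ (l : List β) (C : List (List Int)),
      l.foldl (fun cs e => cs.mapIdx (fun j c => if j < w then c ++ [v e j] else c)) C =
        C.mapIdx (fun j c => if j < w then c ++ l.map (fun e => v e j) else c) := by
  intro l
  induction l with
  | nil =>
    intro C
    apply List.ext_getElem
    · simp
    · intro i h1 h2
      simp only [List.foldl_nil, List.getElem_mapIdx]
      split_ifs <;> simp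
  | cons e l ih =>
    intro C
    rw [List.foldl_cons, ih]
    apply List.ext_getElem
    · simp
    · intro i h1 h2
      simp only [List.getElem_mapIdx]
      split_ifs <;> simp

def segB (s : List (List Int)) (tn i r : Nat) : List Int :=
  (List.range tn).map (fun y => (s.getD i []).getD (r * tn + y) 0)

-- scatter pass over the first m rows: each block bucket accumulates its per-row segments
theorem blocks_fold (s : List (List Int)) (tn nbBN : Nat) :
    ∀ (m : Nat) (B : List (List Int)),
      (List.range m).foldl
        (fun bs i =>
          if i < nbBN * tn then
            bs.mapIdx (fun k b =>
              if i / tn * nbBN ≤ k ∧ k < i / tn * nbBN + nbBN then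
                b ++ segB s tn i (k - i / tn * nbBN) else b)
          else bs) B =
      B.mapIdx (fun k b =>
        b ++ ((List.range m).filter
            (fun i => decide (i < nbBN * tn ∧ i / tn * nbBN ≤ k ∧ k < i / tn * nbBN + nbBN))).flatMap
          (fun i => segB s tn i (k - i / tn * nbBN))) := by
  intro m
  induction m with
  | zero =>
    intro B
    apply List.ext_getElem
    · simp
    · intro i h1 h2
      simp [List.getElem_mapIdx]
  | succ m ih =>
    intro B
    rw [List.range_succ, List.foldl_append, ih, List.foldl_cons, List.foldl_nil]
    by_cases hm : m < nbBN * tn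
    · rw [if_pos hm]
      apply List.ext_getElem
      · simp
      · intro i h1 h2
        simp only [List.length_mapIdx] at h1 h2
        simp only [List.getElem_mapIdx, List.filter_append,
          List.filter_singleton, List.flatMap_append]
        by_cases hband : m / tn * nbBN ≤ i ∧ i < m / tn * nbBN + nbBN
        · rw [if_pos hband]
          have hP : (m < nbBN * tn ∧ m / tn * nbBN ≤ i ∧ i < m / tn * nbBN + nbBN) := ⟨hm, hband⟩
          simp [hP, List.append_assoc]
        · rw [if_neg hband]
          have hP : ¬(m < nbBN * tn ∧ m / tn * nbBN ≤ i ∧ i < m / tn * nbBN + nbBN) :=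
            fun h => hband h.2
          simp [hP]
    · rw [if_neg hm]
      apply List.ext_getElem
      · simp
      · intro i h1 h2
        simp only [List.getElem_mapIdx, List.filter_append,
          List.filter_singleton]
        have hP : ¬(m < nbBN * tn ∧ m / tn * nbBN ≤ i ∧ i < m / tn * nbBN + nbBN) :=
          fun h => hm h.1
        simp [hP]

-- the indices in [0,n) lying in the interval [a, a+m) are a, a+1, …, a+m-1
theorem filter_range_interval (n a m : Nat) (h : a + m ≤ n) :
    (List.range n).filter (fun i => decide (a ≤ i ∧ i < a + m)) =
      (List.range m).map (fun x => a + x) := by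
  have hn : n = a + m + (n - (a + m)) := by omega
  rw [hn, List.range_add, List.range_add, List.filter_append, List.filter_append]
  have h1 : (List.range a).filter (fun i => decide (a ≤ i ∧ i < a + m)) = [] := by
    apply List.filter_eq_nil_iff.2
    intro x hx
    simp only [List.mem_range] at hx
    simp; omega
  have h2 : ((List.range m).map (fun x => a + x)).filter (fun i => decide (a ≤ i ∧ i < a + m)) =
      (List.range m).map (fun x => a + x) := by
    apply List.filter_eq_self.2
    intro x hx
    simp only [List.mem_map, List.mem_range] at hx
    obtain ⟨y, hy, rfl⟩ := hx
    simp; omega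
  have h3 : ((List.range (n - (a + m))).map (fun x => a + m + x)).filter
      (fun i => decide (a ≤ i ∧ i < a + m)) = [] := by
    apply List.filter_eq_nil_iff.2
    intro x hx
    simp only [List.mem_map, List.mem_range] at hx
    obtain ⟨y, hy, rfl⟩ := hx
    simp
  rw [h1, h2, h3]
  simp

theorem mapIdx_replicate_range {α : Type} (w : Nat) (L : Nat → List α) :
    (List.replicate w ([] : List α)).mapIdx (fun j c => if j < w then c ++ L j else c) =
      (List.range w).map L := by
  apply List.ext_getElem
  · simp
  · intro i h1 h2
    simp only [List.length_mapIdx, List.length_replicate] at h1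
    simp [List.getElem_mapIdx, h1]

theorem blocks_final (s : List (List Int)) (tn : Nat) (htn : 1 ≤ tn) :
    (List.replicate (s.length / tn * (s.length / tn)) ([] : List Int)).mapIdx
        (fun k b => b ++
          ((List.range s.length).filter
            (fun i => decide (i < s.length / tn * tn ∧
              i / tn * (s.length / tn) ≤ k ∧ k < i / tn * (s.length / tn) + s.length / tn))).flatMap
            (fun i => segB s tn i (k - i / tn * (s.length / tn)))) =
      (List.range (s.length / tn * (s.length / tn))).map
        (fun k => blocCF s tn (k / (s.length / tn)) (k % (s.length / tn))) := by
  set nbBN := s.length / tn with hnb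
  apply List.ext_getElem
  · simp
  · intro k h1 h2
    simp only [List.length_mapIdx, List.length_replicate] at h1
    simp only [List.getElem_mapIdx, List.getElem_replicate, List.getElem_map, List.getElem_range,
      List.nil_append]
    have hnb0 : 0 < nbBN := Nat.pos_of_ne_zero (fun h0 => by simp [h0] at h1)
    have hq : k / nbBN < nbBN := (Nat.div_lt_iff_lt_mul hnb0).2 h1
    have hfil : (List.range s.length).filter
        (fun i => decide (i < nbBN * tn ∧ i / tn * nbBN ≤ k ∧ k < i / tn * nbBN + nbBN)) =
        (List.range s.length).filter
        (fun i => decide (k / nbBN * tn ≤ i ∧ i < k / nbBN * tn + tn)) := by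
      apply List.filter_congr
      intro i _
      apply decide_eq_decide.2
      constructor
      · rintro ⟨hi1, hi2, hi3⟩
        have hdiv : k / nbBN = i / tn := by
          apply Nat.div_eq_of_lt_le hi2
          rw [Nat.add_mul, Nat.one_mul]; exact hi3
        have e1 := Nat.mod_add_div' i tn
        have e2 := Nat.mod_lt i htn
        constructor
        · rw [hdiv]; exact Nat.div_mul_le_self i tn
        · rw [hdiv]
          calc i = i % tn + i / tn * tn := e1.symm
            _ < tn + i / tn * tn := Nat.add_lt_add_right e2 _
            _ = i / tn * tn + tn := Nat.add_comm _ _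
      · rintro ⟨hi1, hi2⟩
        have hdiv : i / tn = k / nbBN := by
          apply Nat.div_eq_of_lt_le hi1
          rw [Nat.add_mul, Nat.one_mul]; exact hi2
        have e3 := Nat.mod_add_div' k nbBN
        have e4 := Nat.mod_lt k hnb0
        refine ⟨?_, ?_, ?_⟩
        · calc i < k / nbBN * tn + tn := hi2
            _ = (k / nbBN + 1) * tn := by rw [Nat.add_mul, Nat.one_mul]
            _ ≤ nbBN * tn := Nat.mul_le_mul_right tn hq
        · rw [hdiv]; exact Nat.div_mul_le_self k nbBN
        · rw [hdiv]
          calc k = k % nbBN + k / nbBN * nbBN := e3.symm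
            _ < nbBN + k / nbBN * nbBN := Nat.add_lt_add_right e4 _
            _ = k / nbBN * nbBN + nbBN := Nat.add_comm _ _
    have hle : k / nbBN * tn + tn ≤ s.length := by
      have h6 : nbBN * tn ≤ s.length := by rw [hnb]; exact Nat.div_mul_le_self s.length tn
      calc k / nbBN * tn + tn = (k / nbBN + 1) * tn := by rw [Nat.add_mul, Nat.one_mul]
        _ ≤ nbBN * tn := Nat.mul_le_mul_right tn hq
        _ ≤ s.length := h6
    rw [hfil, filter_range_interval _ _ _ hle, List.flatMap_map]
    simp only [blocCF, segB, gridGet]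
    apply List.flatMap_congr
    intro x hx
    rw [List.mem_range] at hx
    have hxdiv : (k / nbBN * tn + x) / tn = k / nbBN := by
      rw [Nat.mul_comm (k / nbBN) tn, Nat.mul_add_div htn, Nat.div_eq_of_lt hx, Nat.add_zero]
    have hsub : k - k / nbBN * nbBN = k % nbBN :=
      Nat.sub_eq_of_eq_add (Nat.mod_add_div' k nbBN).symm
    rw [hxdiv, hsub]

theorem foldl_modify_range0 {α : Type} (f : Nat → α → α) (m : Nat) (C : List α) :
    (List.range m).foldl (fun cs j => cs.modify j (f j)) C =
      C.mapIdx (fun k c => if k < m then f k c else c) := by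
  have h := foldl_modify_range f m 0 C
  simpa using h

theorem segB_eq (s : List (List Int)) (tn i r : Nat) :
    (List.range tn).map (fun y => (s.getD i []).getD (r * tn + y) 0) = segB s tn i r := rfl

theorem B_cf (s : List (List Int)) (t : Int) (ht : 1 ≤ t) :
    SepareSudoku_alt s t =
      ((List.range (s.length / t.toNat * (s.length / t.toNat))).map
         (fun k => blocCF s t.toNat (k / (s.length / t.toNat)) (k % (s.length / t.toNat))),
       colsCF s (s.getD 0 []).length, s) := by
  obtain ⟨tn, rfl⟩ : ∃ tn : Nat, t = (tn : Int) := ⟨t.toNat, by omega⟩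
  have htn : 1 ≤ tn := by exact_mod_cast ht
  unfold SepareSudoku_alt
  simp only [PySem.List.enumerate_eq_map_pyRange s ([] : List Int), trunc_nat,
    PySem.List.len_eq, PySem.List.pyRange_zero_natCast, List.foldl_map,
    Int.toNat_natCast, PySem.List.pyGetD_natCast,
    PySem.Int.floordiv_natCast, ← Nat.cast_mul, ← Nat.cast_add, Nat.cast_lt,
    PySem.List.pyGetD_zero]
  have hsplit := PySem.List.foldl_prod_mk
    (fun (cs : List (List Int)) (y : Nat) =>
      (List.range (s.getD 0 []).length).foldl
        (fun cs j => cs.modify j (fun c => c ++ [(s.getD y []).getD j 0])) cs)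
    (fun (bs : List (List Int)) (y : Nat) =>
      if y < s.length / tn * tn then
        (List.range (s.length / tn)).foldl
          (fun x y_1 =>
            (List.range tn).foldl
              (fun x y_2 =>
                x.modify (y / tn * (s.length / tn) + y_1)
                  (fun b => b ++ [(s.getD y []).getD (y_1 * tn + y_2) 0])) x) bs
      else bs)
    (List.range s.length)
    (List.replicate (s.getD 0 []).length [])
    (List.replicate (s.length / tn * (s.length / tn)) [])
  rw [hsplit]
  simp only [Prod.mk.injEq]
  refine ⟨?_, ?_, trivial⟩
  · -- blocks component
    simp only [foldl_modify_append, foldl_modify_range, segB_eq]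
    rw [blocks_fold, blocks_final s tn htn]
  · -- columns component
    simp only [foldl_modify_range0]
    rw [cols_outer, mapIdx_replicate_range]
    simp only [colsCF, gridGet]

-- A's block-major double loop enumerates the same buckets B's scatter pass fills.
theorem flatMap_range_map_range {α : Type} (a b : Nat) (F : Nat → Nat → α) :
    (List.range a).flatMap (fun q => (List.range b).map (fun r => F q r)) =
    (List.range (a * b)).map (fun k => F (k / b) (k % b)) := by
  rcases Nat.eq_zero_or_pos b with hb | hb
  · subst hb; simp
  · induction a with
    | zero => simp
    | succ a ih =>
      rw [List.range_succ, List.flatMap_append, ih, Nat.succ_mul, List.range_add,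
        List.map_append]
      simp only [List.flatMap_cons, List.flatMap_nil, List.append_nil, List.map_map]
      congr 1
      apply List.map_congr_left
      intro r hr
      rw [List.mem_range] at hr
      have h1 : (a * b + r) / b = a := by
        rw [Nat.mul_comm a b, Nat.mul_add_div hb, Nat.div_eq_of_lt hr]; omega
      have h2 : (a * b + r) % b = r := by
        rw [Nat.mul_comm a b, Nat.mul_add_mod, Nat.mod_eq_of_lt hr]
      simp [h1, h2]

-- ===== VERDICT (by name: the statement is the Claim_ definition above) =====
theorem SepareSudoku_spec : Claim_equal_SepareSudoku := by
  intro s t _ hpre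
  obtain ⟨_, ht, _, _⟩ := hpre
  unfold Spec_SepareSudoku
  rw [A_cf s t ht, B_cf s t ht, flatMap_range_map_range]
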